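-- pv_equiv track=rewrite | github.com/Aydan-moon/News_Headlines_NER | nlp_01.py | convert_to_spacy_format
-- ===== SOURCE A (Python) =====
-- def convert_to_spacy_format(data):
--     spacy_data = []
--     for example in data:
--         words = [token for token, postag, chunk, label in example]
--         entities = []
--         start = 0
--        #This loop iterates over the words and their corresponding NER labels.
--         for word, label in zip(words, [label for token, postag, chunk, label in example]):
--             if label != 'O':
--                 entity = (start, start + len(word), label)
--                 entities.append(entity)
--             start += len(word) + 1
--         spacy_data.append((' '.join(words), {"entities": entities}))
--     return spacy_data
-- ===== SOURCE B (Python) =====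
-- def convert_to_spacy_format(data):
--     result = []
--     for example in data:
--         sentence = ' '.join(t[0] for t in example)
--         # back-to-front pass: offsets derived from the joined sentence's length,
--         # walking right-to-left with an end pointer instead of a left-to-right start pointer
--         entities = []
--         end = len(sentence)
--         for token, _, _, label in reversed(example):
--             start = end - len(token)
--             if label != 'O':
--                 entities.append((start, end, label))
--             end = start - 1
--         entities.reverse()
--         result.append((sentence, {"entities": entities}))
--     return result
-- ===== Notes on version B (the rewrite author's own statement) =====
-- stated objective: alternative
-- what changed: B traverses each example right-to-left: it joins the sentence first, starts an end pointer at the sentence's length, derives each span as (end-len(token), end) while walking backwards, and reverses the collected entities, instead of A's left-to-right running start pointer over zipped word/label lists.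
import Mathlib
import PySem

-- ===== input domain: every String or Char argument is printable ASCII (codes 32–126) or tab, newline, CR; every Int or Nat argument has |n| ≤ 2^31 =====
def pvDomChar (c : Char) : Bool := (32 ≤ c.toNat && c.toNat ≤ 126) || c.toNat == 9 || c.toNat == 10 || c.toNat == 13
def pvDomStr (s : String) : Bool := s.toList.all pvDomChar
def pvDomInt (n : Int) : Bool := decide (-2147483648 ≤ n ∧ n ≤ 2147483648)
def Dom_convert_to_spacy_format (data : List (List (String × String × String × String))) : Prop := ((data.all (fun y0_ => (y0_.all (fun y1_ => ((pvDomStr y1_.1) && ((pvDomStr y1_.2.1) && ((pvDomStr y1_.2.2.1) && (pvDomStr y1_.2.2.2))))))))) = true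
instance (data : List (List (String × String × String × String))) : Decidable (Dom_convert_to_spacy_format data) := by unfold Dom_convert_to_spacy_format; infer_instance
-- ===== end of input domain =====

-- B walks each example right-to-left with an end pointer started at the joined sentence's
-- length (spans emitted backwards, reversed once), instead of A's forward start pointer;
-- same cost, different traversal (return value only).

-- ===== PORT A =====
-- A: one forward loop over (word,label) pairs maintaining (entities, start); outer accumulator list.
def convert_to_spacy_format (data : List (List (String × String × String × String))) :
    List (String × (List (String × List (Int × Int × String)))) :=
  data.foldl (fun spacy_data ex =>
    let words := ex.map (fun t => t.1)
    let labels := ex.map (fun t => t.2.2.2)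
    let res := (words.zip labels).foldl
      (fun (st : List (Int × Int × String) × Int) wl =>
        let entities := if wl.2 ≠ "O" then st.1 ++ [(st.2, st.2 + (PySem.Str.len wl.1 : Int), wl.2)] else st.1
        (entities, st.2 + (PySem.Str.len wl.1 : Int) + 1))
      (([] : List (Int × Int × String)), (0 : Int))
    spacy_data ++ [(PySem.Str.join " " words, [("entities", res.1)])]) []

-- ===== PORT B =====
-- B helper: one example → (sentence, {"entities": …}); backward pass from len(sentence), then reverse.
def pvConvertExampleB (ex : List (String × String × String × String)) :
    String × (List (String × List (Int × Int × String))) :=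
  let sentence := PySem.Str.join " " (ex.map (fun t => t.1))
  let st := ex.reverse.foldl
    (fun (st : List (Int × Int × String) × Int) t =>
      let start := st.2 - (PySem.Str.len t.1 : Int)
      ((if t.2.2.2 ≠ "O" then st.1 ++ [(start, st.2, t.2.2.2)] else st.1), start - 1))
    (([] : List (Int × Int × String)), (PySem.Str.len sentence : Int))
  (sentence, [("entities", st.1.reverse)])

def convert_to_spacy_format_alt (data : List (List (String × String × String × String))) :
    List (String × (List (String × List (Int × Int × String)))) :=
  data.map pvConvertExampleB

-- ===== PRECONDITION & SPEC =====
def Spec_convert_to_spacy_format (data : List (List (String × String × String × String))) (out : List (String × (List (String × List (Int × Int × String))))) : Prop := out = convert_to_spacy_format_alt data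
instance (data : List (List (String × String × String × String))) (out : List (String × (List (String × List (Int × Int × String))))) : Decidable (Spec_convert_to_spacy_format data out) := by
  unfold Spec_convert_to_spacy_format
  have h3 : DecidableEq (List (String × List (Int × Int × String))) := inferInstance
  have h5 : DecidableEq (List (String × List (String × List (Int × Int × String)))) := inferInstance
  exact h5 out (convert_to_spacy_format_alt data)

-- ===== CLAIM (what is proved, stated in full; the proofs are below) =====
def Claim_equal_convert_to_spacy_format : Prop := ∀ (data : List (List (String × String × String × String))), Dom_convert_to_spacy_format data → Spec_convert_to_spacy_format data (convert_to_spacy_format data)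

-- ===== LEMMAS AND PROOFS =====

-- Reference entity list of an example starting at offset s (forward).
def eSpec : List (String × String × String × String) → Int → List (Int × Int × String)
  | [], _ => []
  | t :: tl, s =>
      (if t.2.2.2 ≠ "O" then [(s, s + (PySem.Str.len t.1 : Int), t.2.2.2)] else []) ++
        eSpec tl (s + (PySem.Str.len t.1 : Int) + 1)

-- Total weight Σ (len w + 1) of an example.
def exW : List (String × String × String × String) → Int
  | [] => 0
  | t :: tl => (PySem.Str.len t.1 : Int) + 1 + exW tl

-- A's inner forward fold produces eSpec.
theorem lemA (ex : List (String × String × String × String)) :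
    ∀ (acc : List (Int × Int × String)) (s : Int),
    (((ex.map (fun t => t.1)).zip (ex.map (fun t => t.2.2.2))).foldl
      (fun (st : List (Int × Int × String) × Int) wl =>
        let entities := if wl.2 ≠ "O" then st.1 ++ [(st.2, st.2 + (PySem.Str.len wl.1 : Int), wl.2)] else st.1
        (entities, st.2 + (PySem.Str.len wl.1 : Int) + 1)) (acc, s)).1
    = acc ++ eSpec ex s := by
  induction ex with
  | nil => intro acc s; simp [eSpec]
  | cons hd tl ih =>
    intro acc s
    obtain ⟨w, p, c, l⟩ := hd
    simp only [List.map_cons, List.zip_cons_cons, List.foldl_cons, eSpec]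
    rw [ih]
    split_ifs <;> simp

-- B's backward fold produces eSpec reversed and the end pointer moves down by exW.
theorem lemB (ex : List (String × String × String × String)) :
    ∀ (acc : List (Int × Int × String)) (E : Int),
    (ex.reverse.foldl
      (fun (st : List (Int × Int × String) × Int) t =>
        let start := st.2 - (PySem.Str.len t.1 : Int)
        ((if t.2.2.2 ≠ "O" then st.1 ++ [(start, st.2, t.2.2.2)] else st.1), start - 1))
      (acc, E))
    = (acc ++ (eSpec ex (E - exW ex + 1)).reverse, E - exW ex) := by
  induction ex with
  | nil => intro acc E; simp [eSpec, exW]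
  | cons hd tl ih =>
    intro acc E
    obtain ⟨w, p, c, l⟩ := hd
    simp only [List.reverse_cons, List.foldl_append, List.foldl_cons, List.foldl_nil, ih, eSpec, exW]
    split_ifs
    all_goals
      rw [show E - ((PySem.Str.len w : Int) + 1 + exW tl) + 1 = E - exW tl - (PySem.Str.len w : Int) from by ring,
        show E - exW tl - (PySem.Str.len w : Int) + (PySem.Str.len w : Int) = E - exW tl from by ring,
        show E - ((PySem.Str.len w : Int) + 1 + exW tl) = E - exW tl - (PySem.Str.len w : Int) - 1 from by ring]
      simp

-- Length of the space-joined word list: one less than the total weight, for a nonempty list.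
theorem lenJoin (ws : List String) (h : ws ≠ []) :
    (PySem.Str.len (PySem.Str.join " " ws) : Int)
      = (ws.foldr (fun w a => (PySem.Str.len w : Int) + 1 + a) 0) - 1 := by
  induction ws with
  | nil => exact absurd rfl h
  | cons hd tl ih =>
    cases tl with
    | nil =>
      simp [PySem.Str.len_eq, PySem.Str.toList_join, PySem.Chars.join_singleton]
    | cons b tl' =>
      have := ih (by simp)
      simp only [PySem.Str.len_eq, PySem.Str.toList_join, List.map_cons,
        PySem.Chars.join_cons_cons, List.length_append] at this ⊢
      simp only [List.foldr_cons] at this ⊢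
      push_cast at this ⊢
      simp only [List.length_cons, List.length_nil] at this ⊢
      omega

theorem exW_foldr (ex : List (String × String × String × String)) :
    exW ex = (ex.map (fun t => t.1)).foldr (fun w a => (PySem.Str.len w : Int) + 1 + a) 0 := by
  induction ex with
  | nil => rfl
  | cons hd tl ih => simp [exW, ih]

-- A's per-example value equals B's.
theorem perExample (ex : List (String × String × String × String)) :
    (PySem.Str.join " " (ex.map (fun t => t.1)),
      [("entities",
        (((ex.map (fun t => t.1)).zip (ex.map (fun t => t.2.2.2))).foldl
          (fun (st : List (Int × Int × String) × Int) wl =>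
            let entities := if wl.2 ≠ "O" then st.1 ++ [(st.2, st.2 + (PySem.Str.len wl.1 : Int), wl.2)] else st.1
            (entities, st.2 + (PySem.Str.len wl.1 : Int) + 1))
          (([] : List (Int × Int × String)), (0 : Int))).1)])
    = pvConvertExampleB ex := by
  unfold pvConvertExampleB
  simp only [lemA, lemB, List.nil_append, List.reverse_reverse]
  cases ex with
  | nil => simp [eSpec]
  | cons hd tl =>
    have hE : (PySem.Str.len (PySem.Str.join " " ((hd :: tl).map (fun t => t.1))) : Int)
        = exW (hd :: tl) - 1 := by
      rw [lenJoin _ (by simp), exW_foldr]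
    rw [hE]
    norm_num

theorem mainA (data : List (List (String × String × String × String))) :
    ∀ (pre : List (String × (List (String × List (Int × Int × String))))),
    data.foldl (fun spacy_data ex =>
      let words := ex.map (fun t => t.1)
      let labels := ex.map (fun t => t.2.2.2)
      let res := (words.zip labels).foldl
        (fun (st : List (Int × Int × String) × Int) wl =>
          let entities := if wl.2 ≠ "O" then st.1 ++ [(st.2, st.2 + (PySem.Str.len wl.1 : Int), wl.2)] else st.1
          (entities, st.2 + (PySem.Str.len wl.1 : Int) + 1))
        (([] : List (Int × Int × String)), (0 : Int))
      spacy_data ++ [(PySem.Str.join " " words, [("entities", res.1)])]) pre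
    = pre ++ data.map pvConvertExampleB := by
  induction data with
  | nil => intro pre; simp
  | cons hd tl ih =>
    intro pre
    simp only [List.foldl_cons, List.map_cons]
    rw [ih, perExample]
    simp

-- ===== VERDICT (by name: the statement is the Claim_ definition above) =====
theorem convert_to_spacy_format_spec : Claim_equal_convert_to_spacy_format := by
  intro data _
  unfold Spec_convert_to_spacy_format convert_to_spacy_format convert_to_spacy_format_alt
  simpa using mainA data []
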